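-- pv_equiv track=rewrite | github.com/shaokangtan/python_sandbox | rel_indices.py | check_complete_circular_arrary
-- ===== SOURCE A (Python) =====
-- def check_complete_circular_arrary(arr,start):
--     total = len(arr)
--     check_arr = [0] * total
--     '''for i in range(len(array)):
--         c = arr[i]
--         if check_arr[i + c]:
--             return False
--         else:
--             check_arr[i + c] = 1
--     return True
--     '''
--     for i in range(len(arr)):
--         c = arr[start]
--         start = (start + c) % total
--         if check_arr[start]:
--             return False
--         else:
--             check_arr[start] = 1
--
--     return True
-- ===== SOURCE B (Python) =====
-- def check_complete_circular_arrary(arr, start):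
--     # B ignores `start`: the walk visits n distinct indices iff the jump map
--     # i -> (i + arr[i]) % n is a single n-cycle permutation, which is a
--     # property of arr alone (any admissible start lies on that cycle).
--     n = len(arr)
--     nxt = [(i + v) % n for i, v in enumerate(arr)]
--     if sorted(nxt) != list(range(n)):
--         return False
--     i = 0
--     for steps in range(n):
--         i = nxt[i]
--         if i == 0:
--             return steps + 1 == n
--     return True
-- ===== Notes on version B (the rewrite author's own statement) =====
-- stated objective: alternative
-- what changed: B never simulates the walk from `start`: it tabulates the jump map nxt[i]=(i+arr[i])%n once, tests that it is a permutation via sorted(nxt)==range(n), and then measures the cycle length through index 0 - the walk visits n distinct indices exactly when the jump map is a single n-cycle, a property of arr alone.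
import Mathlib
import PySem

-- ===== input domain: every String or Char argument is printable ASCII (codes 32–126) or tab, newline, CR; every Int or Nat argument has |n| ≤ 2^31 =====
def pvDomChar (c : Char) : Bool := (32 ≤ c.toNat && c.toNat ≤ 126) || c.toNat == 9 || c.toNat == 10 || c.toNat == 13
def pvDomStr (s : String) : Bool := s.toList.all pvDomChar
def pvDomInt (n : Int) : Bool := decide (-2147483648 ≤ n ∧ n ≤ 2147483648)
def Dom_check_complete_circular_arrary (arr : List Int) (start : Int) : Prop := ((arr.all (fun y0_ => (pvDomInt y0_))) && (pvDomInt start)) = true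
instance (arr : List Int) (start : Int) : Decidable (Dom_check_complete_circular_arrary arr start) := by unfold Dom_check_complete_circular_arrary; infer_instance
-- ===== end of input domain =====

-- B drops the stateful walk altogether: it builds the jump table nxt[i] = (i+arr[i]) % n once,
-- rejects unless nxt is a permutation of range(n), then measures the cycle length through index 0
-- — the walk visits n distinct indices iff the jump map is a single n-cycle, so B never uses
-- `start` (objective: alternative algorithm; not faster - A can exit early, B always sorts).

-- ===== PORT A =====
-- A's for-loop over range(len(arr)): state = (check_arr, start), early return False.
def pvCheckLoop (arr : List Int) (total : Int) (check : List Int) (start : Int) : Nat → Bool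
  | 0 => true
  | Nat.succ n =>
    let c := PySem.List.pyGetD arr start 0
    let start' := PySem.Int.mod (start + c) total
    if PySem.List.pyGetD check start' 0 ≠ 0 then false
    else pvCheckLoop arr total (PySem.List.pySetD check start' 1) start' n

def check_complete_circular_arrary (arr : List Int) (start : Int) : Bool :=
  pvCheckLoop arr (arr.length : Int) (List.replicate arr.length 0) start arr.length

-- ===== PORT B =====
-- nxt = [(i + v) % n for i, v in enumerate(arr)]
def pvNxt (arr : List Int) : List Int :=
  (PySem.List.enumerate arr).map (fun p => PySem.Int.mod (p.1 + p.2) (arr.length : Int))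

-- for steps in range(n): i = nxt[i]; if i == 0: return steps + 1 == n  /  after the loop: return True
def pvCycleLoop (nxt : List Int) (n : Int) : Int → List Int → Bool
  | _, [] => true
  | i, steps :: rest =>
    let i' := PySem.List.pyGetD nxt i 0
    if i' = 0 then decide (steps + 1 = n) else pvCycleLoop nxt n i' rest

def check_complete_circular_arrary_alt (arr : List Int) (start : Int) : Bool :=
  let n : Int := (arr.length : Int)
  let nxt := pvNxt arr
  if PySem.List.sorted nxt (fun x => x) false ≠ PySem.List.pyRange 0 n 1 then false
  else pvCycleLoop nxt n 0 (PySem.List.pyRange 0 n 1)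

-- ===== PRECONDITION & SPEC =====
-- Pre_ excludes only the inputs where the Python A raises IndexError: a nonempty arr
-- with the initial start outside Python's index range [-len(arr), len(arr)).
def Pre_check_complete_circular_arrary (arr : List Int) (start : Int) : Prop :=
  arr = [] ∨ (-(arr.length : Int) ≤ start ∧ start < (arr.length : Int))
instance (arr : List Int) (start : Int) : Decidable (Pre_check_complete_circular_arrary arr start) := by unfold Pre_check_complete_circular_arrary; infer_instance
def pvWitness_check_complete_circular_arrary : List Int × Int := ([1, 2], 0)

def Spec_check_complete_circular_arrary (arr : List Int) (start : Int) (out : Bool) : Prop := out = check_complete_circular_arrary_alt arr start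
instance (arr : List Int) (start : Int) (out : Bool) : Decidable (Spec_check_complete_circular_arrary arr start out) := by unfold Spec_check_complete_circular_arrary; infer_instance

-- ===== CLAIM (what is proved, stated in full; the proofs are below) =====
def Claim_equal_check_complete_circular_arrary : Prop := ∀ (arr : List Int) (start : Int), Dom_check_complete_circular_arrary arr start → Pre_check_complete_circular_arrary arr start → Spec_check_complete_circular_arrary arr start (check_complete_circular_arrary arr start)

-- ===== LEMMAS AND PROOFS =====

-- the jump map: one step of the walk, f i = (i + arr[i]) % n  (a proof-side abbreviation)
def pvF (arr : List Int) (i : Int) : Int :=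
  PySem.Int.mod (i + PySem.List.pyGetD arr i 0) (arr.length : Int)

-- the sequence of indices A's loop visits (proof helper)
def pvJumpSeq (arr : List Int) (total : Int) (start : Int) : Nat → List Int
  | 0 => []
  | Nat.succ n =>
    let start' := PySem.Int.mod (start + PySem.List.pyGetD arr start 0) total
    start' :: pvJumpSeq arr total start' n

-- every element produced by the jump loop lies in [0, total) when 0 < total
lemma pvJumpSeq_bounds (arr : List Int) (total : Int) (ht : 0 < total) :
    ∀ (n : Nat) (start : Int) (x : Int), x ∈ pvJumpSeq arr total start n → 0 ≤ x ∧ x < total := by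
  intro n
  induction n with
  | zero => intro start x hx; simp [pvJumpSeq] at hx
  | succ n ih =>
    intro start x hx
    simp only [pvJumpSeq, List.mem_cons] at hx
    rcases hx with rfl | hx
    · exact ⟨PySem.Int.mod_nonneg _ ht, PySem.Int.mod_lt _ ht⟩
    · exact ih _ _ hx

-- reading the check array through pySetD, both indices in range
lemma pvGet_set (xs : List Int) (i j v : Int) (hi0 : 0 ≤ i) (_hi : i < (xs.length : Int))
    (hj0 : 0 ≤ j) (hj : j < (xs.length : Int)) :
    PySem.List.pyGetD (PySem.List.pySetD xs i v) j 0 = if j = i then v else PySem.List.pyGetD xs j 0 := by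
  rw [PySem.List.pySetD_of_nonneg xs v hi0]
  have hjlen : j < ((xs.set i.toNat v).length : Int) := by simpa using hj
  rw [PySem.List.pyGetD_eq_getElem _ 0 hj0 hjlen, PySem.List.pyGetD_eq_getElem _ 0 hj0 hj]
  rw [List.getElem_set]
  have : i.toNat = j.toNat ↔ j = i := by omega
  split_ifs with h1 h2 h2
  · rfl
  · exact absurd (this.1 h1) h2
  · exact absurd (this.2 h2) h1
  · rfl

-- the check loop decides: the jump sequence is duplicate-free and disjoint from marks
lemma pvCheckLoop_eq (arr : List Int) :
    ∀ (n : Nat) (start : Int) (check : List Int),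
      n ≤ arr.length → check.length = arr.length →
      pvCheckLoop arr (arr.length : Int) check start n =
        decide ((pvJumpSeq arr (arr.length : Int) start n).Nodup ∧
          ∀ x ∈ pvJumpSeq arr (arr.length : Int) start n, PySem.List.pyGetD check x 0 = 0) := by
  intro n
  induction n with
  | zero => intro start check _ _; simp [pvCheckLoop, pvJumpSeq]
  | succ n ih =>
    intro start check hn hc
    have ht : (0 : Int) < (arr.length : Int) := by exact_mod_cast Nat.lt_of_lt_of_le (Nat.succ_pos n) hn
    simp only [pvCheckLoop, pvJumpSeq]
    set s' := PySem.Int.mod (start + PySem.List.pyGetD arr start 0) (arr.length : Int) with hs'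
    have hs0 : 0 ≤ s' := PySem.Int.mod_nonneg _ ht
    have hs1 : s' < (arr.length : Int) := PySem.Int.mod_lt _ ht
    by_cases h : PySem.List.pyGetD check s' 0 = 0
    · rw [if_neg (by intro hcon; exact hcon h)]
      rw [ih s' (PySem.List.pySetD check s' 1) (Nat.le_of_succ_le hn)
            (by rw [PySem.List.length_pySetD]; exact hc)]
      rw [decide_eq_decide]
      constructor
      · rintro ⟨hnd, hfresh⟩
        have hnotmem : s' ∉ pvJumpSeq arr (arr.length : Int) s' n := by
          intro hmem
          have := hfresh s' hmem
          rw [pvGet_set check s' s' 1 hs0 (by omega) hs0 (by omega)] at this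
          simp at this
        refine ⟨List.nodup_cons.2 ⟨hnotmem, hnd⟩, ?_⟩
        intro x hx
        rcases List.mem_cons.1 hx with rfl | hx'
        · exact h
        · have := hfresh x hx'
          obtain ⟨hx0, hx1⟩ := pvJumpSeq_bounds arr _ ht n s' x hx'
          rw [pvGet_set check s' x 1 hs0 (by omega) hx0 (by omega)] at this
          split_ifs at this with he
          · exact absurd this (by norm_num)
          · exact this
      · rintro ⟨hnd, hfresh⟩
        obtain ⟨hnotmem, hnd'⟩ := List.nodup_cons.1 hnd
        refine ⟨hnd', ?_⟩
        intro x hx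
        obtain ⟨hx0, hx1⟩ := pvJumpSeq_bounds arr _ ht n s' x hx
        rw [pvGet_set check s' x 1 hs0 (by omega) hx0 (by omega)]
        rw [if_neg (by rintro rfl; exact hnotmem hx)]
        exact hfresh x (List.mem_cons_of_mem _ hx)
    · rw [if_pos h]
      symm
      rw [decide_eq_false_iff_not]
      rintro ⟨-, hfresh⟩
      exact h (hfresh s' (List.mem_cons_self ..))

-- the initial all-zero check array is fresh at every index
lemma pvGetD_replicate_zero (n : Nat) (x : Int) :
    PySem.List.pyGetD (List.replicate n (0 : Int)) x 0 = 0 := by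
  by_cases h : PySem.Raise.InRange (List.replicate n (0 : Int)).length x
  · exact List.eq_of_mem_replicate (PySem.List.pyGetD_mem _ 0 h)
  · simp only [PySem.List.pyGetD, PySem.List.pyGet?, PySem.List.pyIdx?] at *
    simp only [PySem.Raise.InRange] at h
    split_ifs with h1 h2 <;> simp_all

-- A's result is exactly: the visited sequence is duplicate-free
lemma pvA_eq_nodup (arr : List Int) (start : Int) :
    check_complete_circular_arrary arr start =
      decide ((pvJumpSeq arr (arr.length : Int) start arr.length).Nodup) := by
  unfold check_complete_circular_arrary
  rw [pvCheckLoop_eq arr arr.length start (List.replicate arr.length 0) le_rfl (by simp)]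
  rw [decide_eq_decide]
  constructor
  · rintro ⟨hnd, -⟩; exact hnd
  · intro hnd; exact ⟨hnd, fun x _ => pvGetD_replicate_zero _ x⟩

-- the visited sequence is the orbit of the jump map
lemma pvJumpSeq_eq_iter (arr : List Int) :
    ∀ (m : Nat) (x : Int),
      pvJumpSeq arr (arr.length : Int) x m = (List.range m).map (fun k => (pvF arr)^[k+1] x) := by
  intro m
  induction m with
  | zero => intro x; simp [pvJumpSeq]
  | succ m ih =>
    intro x
    show pvF arr x :: pvJumpSeq arr (arr.length : Int) (pvF arr x) m = _
    rw [ih (pvF arr x), List.range_succ_eq_map, List.map_cons, List.map_map]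
    refine congrArg₂ _ rfl (List.map_congr_left ?_)
    intro k _
    show (pvF arr)^[k+1] (pvF arr x) = (pvF arr)^[k+1+1] x
    rw [Function.iterate_succ_apply (pvF arr) (k+1) x]

-- the jump map always lands in [0, n) for a nonempty array
lemma pvF_mem (arr : List Int) (hn : arr ≠ []) (i : Int) :
    0 ≤ pvF arr i ∧ pvF arr i < (arr.length : Int) := by
  have ht : (0 : Int) < (arr.length : Int) := by
    have := List.length_pos_iff.2 hn; omega
  exact ⟨PySem.Int.mod_nonneg _ ht, PySem.Int.mod_lt _ ht⟩

-- nxt is the jump map tabulated over range(n)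
lemma pvNxt_eq (arr : List Int) :
    pvNxt arr = (PySem.List.pyRange 0 (arr.length : Int) 1).map (pvF arr) := by
  unfold pvNxt
  rw [PySem.List.enumerate_eq_map_pyRange (xs := arr) 0, List.map_map]
  rfl

-- reading nxt at an in-range index gives the jump map
lemma pvNxt_get (arr : List Int) (i : Int) (h0 : 0 ≤ i) (h1 : i < (arr.length : Int)) :
    PySem.List.pyGetD (pvNxt arr) i 0 = pvF arr i := by
  rw [pvNxt_eq]
  exact PySem.List.pyGetD_map_pyRange_of_nonneg (pvF arr) arr.length i 0 h0 h1

-- ----- generic orbit lemmas for a self-map of [0, n) -----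

lemma pvIter_mem (n : Nat) (f : Int → Int) (hf : ∀ i, 0 ≤ f i ∧ f i < (n : Int)) (x : Int) :
    ∀ k, 0 ≤ f^[k+1] x ∧ f^[k+1] x < (n : Int) := by
  intro k
  rw [Function.iterate_succ_apply' f k x]
  exact hf _

-- peeling injectivity along the orbit of 0
lemma pvPeel (n : Nat) (hn : 0 < n) (f : Int → Int) (hf : ∀ i, 0 ≤ f i ∧ f i < (n : Int))
    (hinj : ∀ a b : Int, 0 ≤ a → a < (n : Int) → 0 ≤ b → b < (n : Int) → f a = f b → a = b) :
    ∀ (a c : Nat), f^[a] 0 = f^[a + c] 0 → f^[c] 0 = 0 := by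
  intro a
  induction a with
  | zero => intro c h; simpa using h.symm
  | succ a ih =>
    intro c h
    have h1 : f (f^[a] 0) = f (f^[a + c] 0) := by
      have h' : f^[a + 1] 0 = f^[(a + c) + 1] 0 := by
        have : a + 1 + c = (a + c) + 1 := by omega
        rw [this] at h; exact h
      simpa only [Function.iterate_succ_apply'] using h'
    have hm1 : 0 ≤ f^[a] 0 ∧ f^[a] 0 < (n : Int) := by
      cases a with
      | zero => exact ⟨by simp, by simp; exact_mod_cast hn⟩
      | succ a => exact pvIter_mem n f hf 0 a
    have hm2 : 0 ≤ f^[a + c] 0 ∧ f^[a + c] 0 < (n : Int) := by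
      cases hac : a + c with
      | zero => exact ⟨by simp, by simp; exact_mod_cast hn⟩
      | succ b => exact pvIter_mem n f hf 0 b
    exact ih c (hinj _ _ hm1.1 hm1.2 hm2.1 hm2.2 h1)

-- distinct exponents below n give distinct orbit points of 0
lemma pvExpInj (n : Nat) (hn : 0 < n) (f : Int → Int) (hf : ∀ i, 0 ≤ f i ∧ f i < (n : Int))
    (hinj : ∀ a b : Int, 0 ≤ a → a < (n : Int) → 0 ≤ b → b < (n : Int) → f a = f b → a = b)
    (hno : ∀ u : Nat, 0 < u → u < n → f^[u] 0 ≠ 0) :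
    ∀ j k : Nat, j < n → k < n → f^[j] 0 = f^[k] 0 → j = k := by
  have key : ∀ j k : Nat, j ≤ k → k < n → f^[j] 0 = f^[k] 0 → j = k := by
    intro j k hjk hk h
    have hc : f^[k - j] 0 = 0 := by
      apply pvPeel n hn f hf hinj j (k - j)
      have : j + (k - j) = k := by omega
      rw [this]; exact h
    by_contra hne
    exact hno (k - j) (by omega) (by omega) hc
  intro j k hj hk h
  rcases le_total j k with hle | hle
  · exact key j k hle hk h
  · exact (key k j hle hj h.symm).symm

-- the first n orbit points of 0 are a permutation of [0, n)
lemma pvOrbit_perm (n : Nat) (hn : 0 < n) (f : Int → Int) (hf : ∀ i, 0 ≤ f i ∧ f i < (n : Int))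
    (hinj : ∀ a b : Int, 0 ≤ a → a < (n : Int) → 0 ≤ b → b < (n : Int) → f a = f b → a = b)
    (hno : ∀ u : Nat, 0 < u → u < n → f^[u] 0 ≠ 0) :
    ((List.range n).map (fun k => f^[k] 0)).Perm (PySem.List.pyRange 0 (n : Int) 1) := by
  have hmem0 : ∀ k : Nat, 0 ≤ f^[k] 0 ∧ f^[k] 0 < (n : Int) := by
    intro k
    cases k with
    | zero => exact ⟨by simp, by simp; exact_mod_cast hn⟩
    | succ k => exact pvIter_mem n f hf 0 k
  have hnd : ((List.range n).map (fun k => f^[k] 0)).Nodup := by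
    refine List.Nodup.map_on ?_ (List.nodup_range)
    intro j hj k hk h
    exact pvExpInj n hn f hf hinj hno j k (List.mem_range.1 hj) (List.mem_range.1 hk) h
  have hsub : (List.range n).map (fun k => f^[k] 0) ⊆ PySem.List.pyRange 0 (n : Int) 1 := by
    intro x hx
    obtain ⟨k, -, rfl⟩ := List.mem_map.1 hx
    exact PySem.List.mem_pyRange_one.2 ⟨(hmem0 k).1, by simpa using (hmem0 k).2⟩
  refine (List.subperm_of_subset hnd hsub).perm_of_length_le ?_
  simp [PySem.List.length_pyRange_one]

-- permutation of range gives injectivity of f on [0, n)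
lemma pvInj_of_perm (n : Nat) (f : Int → Int)
    (hperm : ((PySem.List.pyRange 0 (n : Int) 1).map f).Perm (PySem.List.pyRange 0 (n : Int) 1)) :
    ∀ a b : Int, 0 ≤ a → a < (n : Int) → 0 ≤ b → b < (n : Int) → f a = f b → a = b := by
  have hnd : ((PySem.List.pyRange 0 (n : Int) 1).map f).Nodup :=
    hperm.nodup_iff.2 (PySem.List.nodup_pyRange_one 0 (n : Int))
  have hpw : (PySem.List.pyRange 0 (n : Int) 1).Pairwise (fun a b => f a ≠ f b) := by
    rw [List.Nodup, List.pairwise_map] at hnd; exact hnd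
  intro a b ha0 ha1 hb0 hb1 hfab
  by_contra hne
  exact List.Pairwise.forall (by intro x y hxy h2; exact hxy h2.symm) hpw
    (PySem.List.mem_pyRange_one.2 ⟨ha0, ha1⟩) (PySem.List.mem_pyRange_one.2 ⟨hb0, hb1⟩) hne hfab


-- ----- the core characterisation -----
-- the n-step orbit of s0 is duplicate-free  ⟺  the jump map permutes [0,n),
-- returns 0 to itself after n steps, and not earlier

lemma pvCore (n : Nat) (hn : 0 < n) (f : Int → Int) (hf : ∀ i, 0 ≤ f i ∧ f i < (n : Int))
    (s0 : Int) (hs00 : 0 ≤ s0) (hs01 : s0 < (n : Int)) :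
    ((List.range n).map (fun k => f^[k+1] s0)).Nodup ↔
      (((PySem.List.pyRange 0 (n : Int) 1).map f).Perm (PySem.List.pyRange 0 (n : Int) 1) ∧
        f^[n] 0 = 0 ∧ ∀ u : Nat, 0 < u → u < n → f^[u] 0 ≠ 0) := by
  have hmemI : ∀ (x : Int) (k : Nat), 0 ≤ f^[k+1] x ∧ f^[k+1] x < (n : Int) := fun x k => pvIter_mem n f hf x k
  constructor
  · -- forward: the orbit of s0 is duplicate-free
    intro hnd
    set L := (List.range n).map (fun k => f^[k+1] s0) with hL
    have hlenL : L.length = n := by simp [hL]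
    have hgetL : ∀ (j : Nat) (hj : j < n), L[j]'(by omega) = f^[j+1] s0 := by
      intro j hj; simp [hL]
    have injL : ∀ j k : Nat, j < n → k < n → f^[j+1] s0 = f^[k+1] s0 → j = k := by
      intro j k hj hk h
      have := (List.Nodup.getElem_inj_iff hnd (i := j) (j := k)
        (hi := by omega) (hj := by omega)).1 (by rw [hgetL j hj, hgetL k hk]; exact h)
      exact this
    have hsub : L ⊆ PySem.List.pyRange 0 (n : Int) 1 := by
      intro x hx
      obtain ⟨k, -, rfl⟩ := List.mem_map.1 hx
      exact PySem.List.mem_pyRange_one.2 ⟨(hmemI s0 k).1, by simpa using (hmemI s0 k).2⟩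
    have hLR : L.Perm (PySem.List.pyRange 0 (n : Int) 1) := by
      refine (List.subperm_of_subset hnd hsub).perm_of_length_le ?_
      simp [hlenL, PySem.List.length_pyRange_one]
    -- s0 returns to itself after exactly n steps
    have hper : f^[n] s0 = s0 := by
      have hs0L : s0 ∈ L := hLR.mem_iff.2 (PySem.List.mem_pyRange_one.2 ⟨hs00, hs01⟩)
      obtain ⟨k, hk, hke⟩ := List.mem_map.1 hs0L
      have hk' : k < n := List.mem_range.1 hk
      rcases Nat.lt_or_ge (k+1) n with hlt | hge
      · exfalso
        have : f^[(k+1)+1] s0 = f^[0+1] s0 := by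
          rw [Function.iterate_succ_apply' f (k+1) s0, hke]
          simp
        exact absurd (injL (k+1) 0 hlt hn this) (by omega)
      · have : k + 1 = n := by omega
        rw [← this]; exact hke
    -- 0 lies on the cycle of s0
    obtain ⟨m, hm1, hmn, hm0⟩ : ∃ m : Nat, 1 ≤ m ∧ m ≤ n ∧ f^[m] s0 = 0 := by
      have h0L : (0 : Int) ∈ L := hLR.mem_iff.2
        (PySem.List.mem_pyRange_one.2 ⟨le_refl 0, by exact_mod_cast hn⟩)
      obtain ⟨k, hk, hke⟩ := List.mem_map.1 h0L
      exact ⟨k+1, by omega, by have := List.mem_range.1 hk; omega, hke⟩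
    have hfn : f^[n] 0 = 0 := by
      calc f^[n] 0 = f^[n] (f^[m] s0) := by rw [hm0]
        _ = f^[n + m] s0 := (Function.iterate_add_apply f n m s0).symm
        _ = f^[m + n] s0 := by rw [Nat.add_comm]
        _ = f^[m] (f^[n] s0) := Function.iterate_add_apply f m n s0
        _ = f^[m] s0 := by rw [hper]
        _ = 0 := hm0
    refine ⟨?_, hfn, ?_⟩
    · -- the tabulated map is a permutation of [0, n)
      obtain ⟨nm, rfl⟩ : ∃ nm, n = nm + 1 := ⟨n - 1, by omega⟩
      have hmapfL : L.map f = ((List.range nm).map (fun k => f^[k+2] s0)) ++ [f s0] := by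
        rw [hL, List.map_map, List.range_succ, List.map_append]
        congr 1
        · apply List.map_congr_left
          intro k _
          exact (Function.iterate_succ_apply' f (k+1) s0).symm
        · simp only [List.map_cons, List.map_nil, Function.comp_apply]
          congr 1
          show f (f^[nm+1] s0) = f s0
          rw [hper]
      have hLdecomp : L = f s0 :: (List.range nm).map (fun k => f^[k+2] s0) := by
        rw [hL, List.range_succ_eq_map, List.map_cons, List.map_map]
        rfl
      have hmfL : (L.map f).Perm L := by
        rw [hmapfL]
        conv_rhs => rw [hLdecomp]
        exact List.perm_append_singleton _ _
      exact ((hLR.symm.map f).trans hmfL).trans hLR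
    · -- no early return of 0
      intro u hu0 hun heq
      have hval : f^[u] 0 = f^[u + m] s0 := by
        rw [← hm0, ← Function.iterate_add_apply f u m s0]
      rcases Nat.lt_or_ge n (u + m) with hgt | hle
      · -- reduce the exponent by one period
        obtain ⟨w, hw⟩ : ∃ w, u + m - n = w := ⟨u + m - n, rfl⟩
        have hred : f^[u + m] s0 = f^[u + m - n] s0 := by
          rw [hw]
          have h2 : u + m = w + n := by omega
          rw [h2, Function.iterate_add_apply f w n s0, hper]
        have : (u + m - n) - 1 + 1 = u + m - n := by omega
        have hres := injL ((u + m - n) - 1) (m - 1) (by omega) (by omega) ?_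
        · omega
        · rw [this]
          have hm' : m - 1 + 1 = m := by omega
          rw [hm']
          rw [← hred, ← hval, heq, ← hm0]
      · have : (u + m) - 1 + 1 = u + m := by omega
        have hres := injL ((u + m) - 1) (m - 1) (by omega) (by omega) ?_
        · omega
        · rw [this]
          have hm' : m - 1 + 1 = m := by omega
          rw [hm']
          rw [← hval, heq, ← hm0]
  · -- backward: permutation + exact first return imply a duplicate-free orbit
    rintro ⟨hperm, hfn, hno⟩
    have hinj := pvInj_of_perm n f hperm
    have hred : ∀ e : Nat, f^[e + n] 0 = f^[e] 0 := by
      intro e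
      rw [Function.iterate_add_apply f e n 0, hfn]
    -- s0 lies on the orbit of 0
    obtain ⟨m, hmn, hm0⟩ : ∃ m : Nat, m < n ∧ f^[m] 0 = s0 := by
      have hs0M : s0 ∈ (List.range n).map (fun k => f^[k] 0) :=
        ((pvOrbit_perm n hn f hf hinj hno).mem_iff).2
          (PySem.List.mem_pyRange_one.2 ⟨hs00, hs01⟩)
      obtain ⟨k, hk, hke⟩ := List.mem_map.1 hs0M
      exact ⟨k, List.mem_range.1 hk, hke⟩
    refine List.Nodup.map_on ?_ (List.nodup_range)
    intro j hj k hk h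
    have hj' : j < n := List.mem_range.1 hj
    have hk' : k < n := List.mem_range.1 hk
    have hex : ∀ e : Nat, e < 2 * n → ∃ e' : Nat, e' < n ∧ f^[e] 0 = f^[e'] 0 ∧ (e' = e ∨ e' + n = e) := by
      intro e he
      rcases Nat.lt_or_ge e n with hlt | hge
      · exact ⟨e, hlt, rfl, Or.inl rfl⟩
      · refine ⟨e - n, by omega, ?_, Or.inr (by omega)⟩
        obtain ⟨w, hw⟩ : ∃ w, e - n = w := ⟨e - n, rfl⟩
        rw [hw]
        have h2 : e = w + n := by omega
        rw [h2, hred]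
    have hje : f^[j+1] s0 = f^[j+1+m] 0 := by
      rw [← hm0, ← Function.iterate_add_apply f (j+1) m 0]
    have hke : f^[k+1] s0 = f^[k+1+m] 0 := by
      rw [← hm0, ← Function.iterate_add_apply f (k+1) m 0]
    obtain ⟨e1, he1n, he1eq, he1c⟩ := hex (j+1+m) (by omega)
    obtain ⟨e2, he2n, he2eq, he2c⟩ := hex (k+1+m) (by omega)
    have : e1 = e2 := by
      apply pvExpInj n hn f hf hinj hno e1 e2 he1n he2n
      rw [← he1eq, ← he2eq, ← hje, ← hke, h]
    omega

-- ----- loop lemmas for B's cycle scan -----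

lemma pvCycleLoop_true (arr : List Int) (n : Nat) (hn : 0 < n) (hlen : arr.length = n)
    (f : Int → Int) (hfeq : ∀ i, 0 ≤ i → i < (n : Int) → PySem.List.pyGetD (pvNxt arr) i 0 = f i)
    (hf : ∀ i, 0 ≤ f i ∧ f i < (n : Int))
    (_hfn : f^[n] 0 = 0) (hno : ∀ u : Nat, 0 < u → u < n → f^[u] 0 ≠ 0) :
    pvCycleLoop (pvNxt arr) (n : Int) 0 (PySem.List.pyRange 0 (n : Int) 1) = true := by
  have hmem0 : ∀ t : Nat, 0 ≤ f^[t] 0 ∧ f^[t] 0 < (n : Int) := by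
    intro t
    cases t with
    | zero => exact ⟨by simp, by simp; exact_mod_cast hn⟩
    | succ t => exact pvIter_mem n f hf 0 t
  have aux : ∀ (d t : Nat), t + d = n →
      pvCycleLoop (pvNxt arr) (n : Int) (f^[t] 0) (PySem.List.pyRange (t : Int) (n : Int) 1) = true := by
    intro d
    induction d with
    | zero =>
      intro t ht
      rw [PySem.List.pyRange_one_eq_nil (by omega)]
      rfl
    | succ d ih =>
      intro t ht
      rw [PySem.List.pyRange_one_cons (by exact_mod_cast (by omega : t < n))]
      simp only [pvCycleLoop]
      rw [hfeq (f^[t] 0) (hmem0 t).1 (hmem0 t).2]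
      rw [show f (f^[t] 0) = f^[t+1] 0 from (Function.iterate_succ_apply' f t 0).symm]
      by_cases hz : f^[t+1] 0 = 0
      · rw [if_pos hz]
        have htn : t + 1 = n := by
          by_contra hne
          exact hno (t+1) (by omega) (by omega) hz
        simp only [decide_eq_true_eq]
        exact_mod_cast congrArg (Nat.cast : Nat → Int) htn
      · rw [if_neg hz]
        have : ((t : Int) + 1) = ((t + 1 : Nat) : Int) := by push_cast; ring
        rw [this]
        exact ih (t+1) (by omega)
  have := aux n 0 (by omega)
  simpa using this

lemma pvCycleLoop_no_early (arr : List Int) (n : Nat) (hn : 0 < n)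
    (f : Int → Int) (hfeq : ∀ i, 0 ≤ i → i < (n : Int) → PySem.List.pyGetD (pvNxt arr) i 0 = f i)
    (hf : ∀ i, 0 ≤ f i ∧ f i < (n : Int))
    (htrue : pvCycleLoop (pvNxt arr) (n : Int) 0 (PySem.List.pyRange 0 (n : Int) 1) = true) :
    ∀ u : Nat, 0 < u → u < n → f^[u] 0 ≠ 0 := by
  have hmem0 : ∀ t : Nat, 0 ≤ f^[t] 0 ∧ f^[t] 0 < (n : Int) := by
    intro t
    cases t with
    | zero => exact ⟨by simp, by simp; exact_mod_cast hn⟩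
    | succ t => exact pvIter_mem n f hf 0 t
  have aux : ∀ (d t : Nat), t + d = n →
      pvCycleLoop (pvNxt arr) (n : Int) (f^[t] 0) (PySem.List.pyRange (t : Int) (n : Int) 1) = true →
      ∀ u : Nat, t < u → u < n → f^[u] 0 ≠ 0 := by
    intro d
    induction d with
    | zero =>
      intro t ht _ u hu1 hu2
      omega
    | succ d ih =>
      intro t ht hloop u hu1 hu2
      rw [PySem.List.pyRange_one_cons (by exact_mod_cast (by omega : t < n))] at hloop
      simp only [pvCycleLoop] at hloop
      rw [hfeq (f^[t] 0) (hmem0 t).1 (hmem0 t).2] at hloop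
      rw [show f (f^[t] 0) = f^[t+1] 0 from (Function.iterate_succ_apply' f t 0).symm] at hloop
      by_cases hz : f^[t+1] 0 = 0
      · rw [if_pos hz] at hloop
        simp only [decide_eq_true_eq] at hloop
        have : t + 1 = n := by exact_mod_cast hloop
        omega
      · rw [if_neg hz] at hloop
        rw [show ((t : Int) + 1) = ((t + 1 : Nat) : Int) by push_cast; ring] at hloop
        rcases Nat.lt_or_ge (t+1) u with hgt | hle
        · exact ih (t+1) (by omega) hloop u hgt hu2
        · have : u = t + 1 := by omega
          rw [this]
          exact hz
  intro u hu1 hu2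
  exact aux n 0 (by omega) (by simpa using htrue) u hu1 hu2

-- f^[n] 0 = 0 follows from the permutation property together with no early return
lemma pvReturn_n (n : Nat) (hn : 0 < n) (f : Int → Int) (hf : ∀ i, 0 ≤ f i ∧ f i < (n : Int))
    (hinj : ∀ a b : Int, 0 ≤ a → a < (n : Int) → 0 ≤ b → b < (n : Int) → f a = f b → a = b)
    (hno : ∀ u : Nat, 0 < u → u < n → f^[u] 0 ≠ 0) :
    f^[n] 0 = 0 := by
  have hmemn : 0 ≤ f^[n] 0 ∧ f^[n] 0 < (n : Int) := by
    obtain ⟨m, rfl⟩ : ∃ m, n = m + 1 := ⟨n - 1, by omega⟩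
    exact pvIter_mem (m+1) f hf 0 m
  have hR : f^[n] 0 ∈ PySem.List.pyRange 0 (n : Int) 1 :=
    PySem.List.mem_pyRange_one.2 ⟨hmemn.1, by simpa using hmemn.2⟩
  have hM : f^[n] 0 ∈ (List.range n).map (fun k => f^[k] 0) :=
    ((pvOrbit_perm n hn f hf hinj hno).mem_iff).2 hR
  obtain ⟨j, hj, hje⟩ := List.mem_map.1 hM
  have hj' : j < n := List.mem_range.1 hj
  rcases Nat.eq_zero_or_pos j with rfl | hjpos
  · simpa using hje.symm
  · exfalso
    have hc : f^[n - j] 0 = 0 := by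
      apply pvPeel n hn f hf hinj j (n - j)
      have : j + (n - j) = n := by omega
      rw [this]; exact hje
    exact hno (n - j) (by omega) (by omega) hc

-- the permutation test of B: sorted(nxt) == range(n) ⟺ map f range ~ range
lemma pvSorted_iff (arr : List Int) (n : Nat) (hlen : arr.length = n) :
    (PySem.List.sorted (pvNxt arr) (fun x => x) false = PySem.List.pyRange 0 (n : Int) 1) ↔
      (((PySem.List.pyRange 0 (n : Int) 1).map (pvF arr)).Perm (PySem.List.pyRange 0 (n : Int) 1)) := by
  constructor
  · intro h
    have := PySem.List.sorted_perm (pvNxt arr) (fun x => x) false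
    rw [h, pvNxt_eq, hlen] at this
    exact this.symm
  · intro h
    rw [pvNxt_eq, hlen]
    exact PySem.List.sorted_eq_of_perm_of_pairwise_lt _ _ (fun x => x) h.symm (PySem.List.pairwise_lt_pyRange_one 0 (n : Int))

-- ----- assembling the verdict -----

lemma pvMain (arr : List Int) (start : Int)
    (hpre : Pre_check_complete_circular_arrary arr start) :
    check_complete_circular_arrary arr start = check_complete_circular_arrary_alt arr start := by
  rcases eq_or_ne arr [] with rfl | hne
  · rfl
  · have hn : 0 < arr.length := List.length_pos_iff.2 hne
    have hnI : (0 : Int) < (arr.length : Int) := by exact_mod_cast hn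
    obtain ⟨hl, hr⟩ : -(arr.length : Int) ≤ start ∧ start < (arr.length : Int) := by
      rcases hpre with h | h
      · exact absurd h hne
      · exact h
    have hf := pvF_mem arr hne
    have hfeq : ∀ i, 0 ≤ i → i < ((arr.length : Nat) : Int) → PySem.List.pyGetD (pvNxt arr) i 0 = pvF arr i :=
      fun i h0 h1 => pvNxt_get arr i h0 h1
    -- normalise the start index into [0, n)
    obtain ⟨s0, hs00, hs01, hfs⟩ :
        ∃ s0 : Int, 0 ≤ s0 ∧ s0 < (arr.length : Int) ∧ pvF arr start = pvF arr s0 := by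
      rcases lt_or_ge start 0 with hneg | hpos
      · refine ⟨start + (arr.length : Int), by omega, by omega, ?_⟩
        have hg : PySem.List.pyGetD arr start 0 = PySem.List.pyGetD arr (start + (arr.length : Int)) 0 := by
          have hkpos : 0 < (-start).toNat := by omega
          have hkle : (-start).toNat ≤ arr.length := by omega
          have hk : start = -(((-start).toNat : Nat) : Int) := by omega
          rw [hk, PySem.List.pyGetD_neg_natCast arr (-start).toNat 0 hkpos hkle]
          have h0 : (0 : Int) ≤ -(((-start).toNat : Nat) : Int) + (arr.length : Int) := by omega
          have h1 : -(((-start).toNat : Nat) : Int) + (arr.length : Int) < (arr.length : Int) := by omega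
          rw [PySem.List.pyGetD_eq_getElem _ 0 h0 h1]
          congr 1
          omega
        unfold pvF
        rw [hg]
        rw [PySem.Int.mod_eq_emod_of_pos hnI, PySem.Int.mod_eq_emod_of_pos hnI]
        have : start + (arr.length : Int) + PySem.List.pyGetD arr (start + (arr.length : Int)) 0 =
            (start + PySem.List.pyGetD arr (start + (arr.length : Int)) 0) + (arr.length : Int) * 1 := by ring
        rw [this, Int.add_mul_emod_self_left]
      · exact ⟨start, hpos, hr, rfl⟩
    rw [pvA_eq_nodup, pvJumpSeq_eq_iter]
    have hmapeq : (List.range arr.length).map (fun k => (pvF arr)^[k+1] start) =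
        (List.range arr.length).map (fun k => (pvF arr)^[k+1] s0) := by
      apply List.map_congr_left
      intro k _
      rw [Function.iterate_succ_apply, Function.iterate_succ_apply, hfs]
    rw [hmapeq]
    show _ = check_complete_circular_arrary_alt arr start
    unfold check_complete_circular_arrary_alt
    by_cases hnd : ((List.range arr.length).map (fun k => (pvF arr)^[k+1] s0)).Nodup
    · obtain ⟨hperm, hfn, hno⟩ := (pvCore arr.length hn (pvF arr) hf s0 hs00 hs01).1 hnd
      have hsorted := (pvSorted_iff arr arr.length rfl).2 hperm
      rw [decide_eq_true hnd]
      rw [if_neg (by simp [hsorted])]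
      exact (pvCycleLoop_true arr arr.length hn rfl (pvF arr) hfeq hf hfn hno).symm
    · rw [decide_eq_false hnd]
      by_cases hs : PySem.List.sorted (pvNxt arr) (fun x => x) false = PySem.List.pyRange 0 ((arr.length : Nat) : Int) 1
      · have hperm := (pvSorted_iff arr arr.length rfl).1 hs
        rw [if_neg (by simp [hs])]
        cases hloop : pvCycleLoop (pvNxt arr) ((arr.length : Nat) : Int) 0 (PySem.List.pyRange 0 ((arr.length : Nat) : Int) 1) with
        | false => rfl
        | true =>
          exfalso
          have hno := pvCycleLoop_no_early arr arr.length hn (pvF arr) hfeq hf hloop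
          have hinj := pvInj_of_perm arr.length (pvF arr) hperm
          have hfn := pvReturn_n arr.length hn (pvF arr) hf hinj hno
          exact hnd ((pvCore arr.length hn (pvF arr) hf s0 hs00 hs01).2 ⟨hperm, hfn, hno⟩)
      · rw [if_pos hs]

-- ===== VERDICT (by name: the statement is the Claim_ definition above) =====
theorem check_complete_circular_arrary_spec : Claim_equal_check_complete_circular_arrary := by
  intro arr start _ hpre
  exact pvMain arr start hpre
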